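-- pv_equiv track=rewrite | github.com/Kallbrig/kobo-utils | kobo_utils/common.py | normalize_book_title
-- ===== SOURCE A (Python) =====
-- def normalize_book_title(title):
--     """Normalize a book title for use in filenames.
--
--     Args:
--         title (str): Original book title
--
--     Returns:
--         str: Normalized book title
--     """
--     if not title:
--         return "Unknown Title"
--
--     # Replace characters that are problematic in filenames
--     replacements = {
--         ':': ' -',
--         '/': '-',
--         '\\': '-',
--         '*': '',
--         '?': '',
--         '"': "'",
--         '<': '',
--         '>': '',
--         '|': '-'
--     }
--
--     for char, replacement in replacements.items():
--         title = title.replace(char, replacement)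
--
--     return title.strip()
-- ===== SOURCE B (Python) =====
-- def normalize_book_title(title):
--     """Normalize a book title for use in filenames.
--
--     Single accumulation pass with a hard-coded branch table instead of a
--     replacements dict and nine title.replace scans.
--     """
--     if not title:
--         return "Unknown Title"
--     out = []
--     for ch in title:
--         if ch == ':':
--             out.append(' -')
--         elif ch in '/\\|':
--             out.append('-')
--         elif ch in '*?<>':
--             pass  # dropped
--         elif ch == '"':
--             out.append("'")
--         else:
--             out.append(ch)
--     return ''.join(out).strip()
-- ===== Notes on version B (the rewrite author's own statement) =====
-- stated objective: simpler
-- what changed: Replaces the replacements dict and its nine sequential title.replace scans with a single accumulation pass over the characters using a hard-coded if/elif branch table, then one join and strip.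
import Mathlib
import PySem

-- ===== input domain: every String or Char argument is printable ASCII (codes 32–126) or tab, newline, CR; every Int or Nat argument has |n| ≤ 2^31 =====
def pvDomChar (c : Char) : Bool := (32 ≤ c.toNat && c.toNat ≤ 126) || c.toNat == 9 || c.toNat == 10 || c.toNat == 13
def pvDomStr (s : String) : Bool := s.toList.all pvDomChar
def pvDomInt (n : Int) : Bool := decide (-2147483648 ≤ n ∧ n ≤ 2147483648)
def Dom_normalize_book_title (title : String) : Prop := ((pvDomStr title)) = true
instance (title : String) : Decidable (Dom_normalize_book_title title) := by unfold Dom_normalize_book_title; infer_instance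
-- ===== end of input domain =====

-- B replaces A's replacements dict and its nine sequential title.replace scans with one
-- accumulation pass using a hard-coded branch table, joined and stripped once (objective: simpler).

-- ===== PORT A =====
def nbReplacements : PySem.Dict String String :=
  PySem.Dict.ofList [(":", " -"), ("/", "-"), ("\\", "-"), ("*", ""), ("?", ""),
                     ("\"", "'"), ("<", ""), (">", ""), ("|", "-")]

def normalize_book_title (title : String) : String :=
  if title = "" then "Unknown Title"
  else
    PySem.Str.strip
      (nbReplacements.items.foldl (fun t p => PySem.Str.replace t p.1 p.2) title)

-- ===== PORT B =====
-- the if/elif branch table: what one character contributes to the output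
def nbBranch (ch : Char) : List Char :=
  if ch = ':' then [' ', '-']
  else if ch = '/' ∨ ch = '\\' ∨ ch = '|' then ['-']
  else if ch = '*' ∨ ch = '?' ∨ ch = '<' ∨ ch = '>' then []
  else if ch = '"' then ['\'']
  else [ch]

-- the accumulation loop over the characters (B's `for ch in title`)
def nbLoop : List Char → List (List Char)
  | [] => []
  | ch :: rest => nbBranch ch :: nbLoop rest

def normalize_book_title_alt (title : String) : String :=
  if title = "" then "Unknown Title"
  else PySem.Str.strip (String.ofList (nbLoop title.toList).flatten)

-- ===== PRECONDITION & SPEC =====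
def Spec_normalize_book_title (title : String) (out : String) : Prop := out = normalize_book_title_alt title
instance (title : String) (out : String) : Decidable (Spec_normalize_book_title title out) := by unfold Spec_normalize_book_title; infer_instance

-- ===== CLAIM (what is proved, stated in full; the proofs are below) =====
def Claim_equal_normalize_book_title : Prop := ∀ (title : String), Dom_normalize_book_title title → Spec_normalize_book_title title (normalize_book_title title)

-- ===== LEMMAS AND PROOFS =====

theorem go_single (c : Char) (rep : List Char) :
    ∀ (l : List Char) (fuel : Nat) (acc : List Char), l.length ≤ fuel →
      PySem.Chars.replace.go [c] rep fuel l acc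
        = acc.reverse ++ l.flatMap (fun x => if x = c then rep else [x]) := by
  intro l
  induction l with
  | nil =>
      intro fuel acc _
      cases fuel <;> simp [PySem.Chars.replace.go]
  | cons x t ih =>
      intro fuel acc h
      cases fuel with
      | zero => simp at h
      | succ f =>
        rw [PySem.Chars.replace.go]
        by_cases hx : x = c
        · subst hx
          simp [List.isPrefixOf, ih f _ (by simpa using h)]
        · simp [List.isPrefixOf, hx, Ne.symm hx, ih f _ (by simpa using h)]

theorem replace_single (cs : List Char) (c : Char) (rep : List Char) :
    PySem.Chars.replace cs [c] rep = cs.flatMap (fun x => if x = c then rep else [x]) := by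
  rw [PySem.Chars.replace]
  simp [go_single c rep cs cs.length [] le_rfl]

theorem nbLoop_flatten (cs : List Char) : (nbLoop cs).flatten = cs.flatMap nbBranch := by
  induction cs with
  | nil => rfl
  | cons x t ih => simp [nbLoop, ih]

theorem per_char (x : Char) :
    (List.flatMap (fun y => if y = '|' then ['-'] else [y])
     (List.flatMap (fun y => if y = '>' then [] else [y])
     (List.flatMap (fun y => if y = '<' then [] else [y])
     (List.flatMap (fun y => if y = '"' then ['\''] else [y])
     (List.flatMap (fun y => if y = '?' then [] else [y])
     (List.flatMap (fun y => if y = '*' then [] else [y])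
     (List.flatMap (fun y => if y = '\\' then ['-'] else [y])
     (List.flatMap (fun y => if y = '/' then ['-'] else [y])
     (if x = ':' then [' ', '-'] else [x])))))))))
    = nbBranch x := by
  by_cases h1 : x = ':'; · subst h1; decide
  by_cases h2 : x = '/'; · subst h2; decide
  by_cases h3 : x = '\\'; · subst h3; decide
  by_cases h4 : x = '*'; · subst h4; decide
  by_cases h5 : x = '?'; · subst h5; decide
  by_cases h6 : x = '"'; · subst h6; decide
  by_cases h7 : x = '<'; · subst h7; decide
  by_cases h8 : x = '>'; · subst h8; decide
  by_cases h9 : x = '|'; · subst h9; decide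
  simp [nbBranch, h1, h2, h3, h4, h5, h6, h7, h8, h9]

theorem chain_eq (cs : List Char) :
    (List.flatMap (fun y => if y = '|' then ['-'] else [y])
     (List.flatMap (fun y => if y = '>' then [] else [y])
     (List.flatMap (fun y => if y = '<' then [] else [y])
     (List.flatMap (fun y => if y = '"' then ['\''] else [y])
     (List.flatMap (fun y => if y = '?' then [] else [y])
     (List.flatMap (fun y => if y = '*' then [] else [y])
     (List.flatMap (fun y => if y = '\\' then ['-'] else [y])
     (List.flatMap (fun y => if y = '/' then ['-'] else [y])
     (List.flatMap (fun y => if y = ':' then [' ', '-'] else [y]) cs)))))))))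
    = cs.flatMap nbBranch := by
  induction cs with
  | nil => simp
  | cons x t ih =>
      simp only [List.flatMap_cons, List.flatMap_append, ih]
      rw [per_char x]

theorem nb_agree (title : String) : normalize_book_title title = normalize_book_title_alt title := by
  by_cases h : title = ""
  · simp [normalize_book_title, normalize_book_title_alt, h]
  · simp only [normalize_book_title, normalize_book_title_alt, if_neg h]
    have hitems : nbReplacements.items = [(":", " -"), ("/", "-"), ("\\", "-"), ("*", ""),
        ("?", ""), ("\"", "'"), ("<", ""), (">", ""), ("|", "-")] := rfl
    rw [hitems]
    simp only [List.foldl]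
    apply congrArg PySem.Str.strip ?_
    have hA : ∀ (s o n : String), PySem.Str.replace s o n = String.ofList (PySem.Chars.replace s.toList o.toList n.toList) := fun _ _ _ => rfl
    rw [hA, hA, hA, hA, hA, hA, hA, hA, hA]
    apply congrArg String.ofList ?_
    simp only [String.toList_ofList, nbLoop_flatten]
    have e1 : (":" : String).toList = [':'] := rfl
    have e2 : ("/" : String).toList = ['/'] := rfl
    have e3 : ("\\" : String).toList = ['\\'] := rfl
    have e4 : ("*" : String).toList = ['*'] := rfl
    have e5 : ("?" : String).toList = ['?'] := rfl
    have e6 : ("\"" : String).toList = ['"'] := rfl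
    have e7 : ("<" : String).toList = ['<'] := rfl
    have e8 : (">" : String).toList = ['>'] := rfl
    have e9 : ("|" : String).toList = ['|'] := rfl
    have r1 : (" -" : String).toList = [' ', '-'] := rfl
    have r2 : ("-" : String).toList = ['-'] := rfl
    have r3 : ("" : String).toList = [] := rfl
    have r4 : ("'" : String).toList = ['\''] := rfl
    rw [e1, e2, e3, e4, e5, e6, e7, e8, e9, r1, r2, r3, r4]
    simp only [replace_single]
    exact chain_eq title.toList

-- ===== VERDICT (by name: the statement is the Claim_ definition above) =====
theorem normalize_book_title_spec : Claim_equal_normalize_book_title := by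
  intro title _
  unfold Spec_normalize_book_title
  exact nb_agree title
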